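-- pv_equiv track=rewrite | github.com/IvanZhylin/AOIS | lab_1/src/bcd5421.py | encode_5421
-- ===== SOURCE A (Python) =====
-- ENCODE_5421: dict[int, list[int]] = {
--     0: [0, 0, 0, 0],
--     1: [0, 0, 0, 1],
--     2: [0, 0, 1, 0],
--     3: [0, 0, 1, 1],
--     4: [0, 1, 0, 0],
--     5: [1, 0, 0, 0],
--     6: [1, 0, 0, 1],
--     7: [1, 0, 1, 0],
--     8: [1, 0, 1, 1],
--     9: [1, 1, 0, 0],
-- }
--
-- def encode_5421(number: int) -> list[int]:
--     """Закодировать неотрицательное целое число в биты 5421 BCD."""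
--     if number < 0:
--         raise ValueError("5421 BCD поддерживает только неотрицательные числа")
--
--     digits: list[int] = []
--     current = number
--     if current == 0:
--         digits = [0]
--     else:
--         while current > 0:
--             digits.append(current % 10)
--             current //= 10
--         digits.reverse()
--
--     bits: list[int] = []
--     for d in digits:
--         bits.extend(ENCODE_5421[d])
--     return bits
-- ===== SOURCE B (Python) =====
-- def encode_5421(number: int) -> list[int]:
--     """Закодировать неотрицательное целое число в биты 5421 BCD."""
--     if number < 0:
--         raise ValueError("5421 BCD поддерживает только неотрицательные числа")
--     bits: list[int] = []
--     n = number
--     while n > 0: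
--         d = n % 10
--         t = 1 if d >= 5 else 0
--         r = d - 5 * t
--         bits = [t, r // 4, (r // 2) % 2, r % 2] + bits
--         n //= 10
--     return bits if bits else [0, 0, 0, 0]
-- ===== Notes on version B (the rewrite author's own statement) =====
-- stated objective: simpler
-- what changed: Replaces the lookup table and the two-pass digits-then-encode structure with a single back-to-front loop that computes each digit's four weighted-BCD bits arithmetically (top bit set when the digit is at least five, remainder in binary).
import Mathlib
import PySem

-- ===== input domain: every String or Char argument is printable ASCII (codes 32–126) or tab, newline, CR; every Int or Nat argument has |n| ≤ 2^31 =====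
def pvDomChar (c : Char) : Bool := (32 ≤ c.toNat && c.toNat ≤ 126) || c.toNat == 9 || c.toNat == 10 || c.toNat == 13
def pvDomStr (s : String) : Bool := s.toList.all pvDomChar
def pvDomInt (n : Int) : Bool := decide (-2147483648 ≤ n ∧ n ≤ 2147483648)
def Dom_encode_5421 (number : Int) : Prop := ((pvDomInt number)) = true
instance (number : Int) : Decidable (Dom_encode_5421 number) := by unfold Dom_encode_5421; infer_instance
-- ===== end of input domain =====

-- B replaces A's lookup table and two-pass digits-then-encode structure with one
-- back-to-front loop computing each digit's 5421 bits arithmetically (objective: simpler).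


-- ===== PORT A =====
-- the module-level ENCODE_5421 dict, built in insertion order
def pvENCODE_5421 : PySem.Dict Int (List Int) :=
  (((((((((((PySem.Dict.empty).insert 0 [0, 0, 0, 0]).insert 1 [0, 0, 0, 1]).insert 2
      [0, 0, 1, 0]).insert 3 [0, 0, 1, 1]).insert 4 [0, 1, 0, 0]).insert 5
      [1, 0, 0, 0]).insert 6 [1, 0, 0, 1]).insert 7 [1, 0, 1, 0]).insert 8
      [1, 0, 1, 1]).insert 9 [1, 1, 0, 0])

-- the 'while current > 0' digit loop of A (digits appended least-significant first);
-- the Nat fuel (started at current.toNat, an upper bound on the iteration count) only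
-- makes the recursion structural — the fuel-0 branch is never taken while 0 < current
def pvDigitsAux : Nat → Int → List Int → List Int
  | 0, _, digits => digits
  | fuel + 1, current, digits =>
    if 0 < current then
      pvDigitsAux fuel (PySem.Int.floordiv current 10)
        (digits ++ [PySem.Int.mod current 10])
    else digits

def encode_5421 (number : Int) : List Int :=
  -- 'if number < 0: raise ValueError' → excluded by Pre_encode_5421
  let digits : List Int :=
    if number = 0 then [0] else (pvDigitsAux number.toNat number []).reverse
  -- ENCODE_5421[d]: KeyError is unreachable (every d is a decimal digit 0–9, all present);
  -- the getD [] default is therefore never taken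
  digits.foldl (fun bits d => bits ++ (pvENCODE_5421.get? d).getD []) []

-- ===== PORT B =====
-- the four 5421 bits of a digit, computed arithmetically (lines 'd = …' … 'bits = […] + bits')
def pvEncDigit (d : Int) : List Int :=
  let t : Int := if 5 ≤ d then 1 else 0
  let r : Int := d - 5 * t
  [t, PySem.Int.floordiv r 4, PySem.Int.mod (PySem.Int.floordiv r 2) 2, PySem.Int.mod r 2]

-- B's single 'while n > 0' loop, prepending each digit's bits (same Nat-fuel device)
def pvAltAux : Nat → Int → List Int → List Int
  | 0, _, bits => bits
  | fuel + 1, n, bits =>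
    if 0 < n then
      pvAltAux fuel (PySem.Int.floordiv n 10)
        (pvEncDigit (PySem.Int.mod n 10) ++ bits)
    else bits

def encode_5421_alt (number : Int) : List Int :=
  -- 'if number < 0: raise ValueError' → excluded by Pre_encode_5421
  let bits := pvAltAux number.toNat number []
  if bits = [] then [0, 0, 0, 0] else bits

-- ===== PRECONDITION & SPEC =====
-- A raises ValueError on negative numbers; Pre_ admits exactly the nonnegative inputs.
def Pre_encode_5421 (number : Int) : Prop := 0 ≤ number
instance (number : Int) : Decidable (Pre_encode_5421 number) := by
  unfold Pre_encode_5421; infer_instance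

def pvWitness_encode_5421 : Int := (7)

def Spec_encode_5421 (number : Int) (out : List Int) : Prop := out = encode_5421_alt number
instance (number : Int) (out : List Int) : Decidable (Spec_encode_5421 number out) := by
  unfold Spec_encode_5421; infer_instance

-- ===== CLAIM (what is proved, stated in full; the proofs are below) =====
def Claim_equal_encode_5421 : Prop := ∀ (number : Int), Dom_encode_5421 number → Pre_encode_5421 number → Spec_encode_5421 number (encode_5421 number)

-- ===== LEMMAS AND PROOFS =====

-- the table lookup and the arithmetic encoding agree on every decimal digit
theorem pv_lut_eq_enc (d : Int) (h0 : 0 ≤ d) (h9 : d < 10) :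
    ((pvENCODE_5421.get? d).getD []) = pvEncDigit d := by
  interval_cases d <;> decide

-- one loop step: the next value is nonnegative and strictly smaller
theorem pv_step (n : Int) (hn : 0 < n) :
    0 ≤ PySem.Int.floordiv n 10 ∧ PySem.Int.floordiv n 10 < n := by
  have h10 : PySem.Int.floordiv n 10 = n / 10 :=
    PySem.Int.floordiv_eq_ediv_of_pos (by omega)
  rw [h10]; omega

-- A's digits loop factors through the accumulator
theorem pvDigitsAux_acc (k : Nat) :
    ∀ (n : Int) (acc : List Int), pvDigitsAux k n acc = acc ++ pvDigitsAux k n [] := by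
  induction k with
  | zero => intro n acc; simp [pvDigitsAux]
  | succ k ih =>
    intro n acc
    by_cases h : 0 < n
    · simp only [pvDigitsAux, h, if_pos]
      rw [ih _ (acc ++ [PySem.Int.mod n 10]), ih _ ([] ++ [PySem.Int.mod n 10])]
      simp
    · simp [pvDigitsAux, h]

-- B's loop factors through the accumulator
theorem pvAltAux_acc (k : Nat) :
    ∀ (n : Int) (bits : List Int), pvAltAux k n bits = pvAltAux k n [] ++ bits := by
  induction k with
  | zero => intro n bits; simp [pvAltAux]
  | succ k ih =>
    intro n bits
    by_cases h : 0 < n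
    · simp only [pvAltAux, h, if_pos]
      rw [ih _ (pvEncDigit (PySem.Int.mod n 10) ++ bits),
          ih _ (pvEncDigit (PySem.Int.mod n 10) ++ [])]
      simp
    · simp [pvAltAux, h]

-- main bridge: B's one-pass loop equals A's reversed digit list flat-mapped through the table
theorem pv_main (k : Nat) :
    ∀ (n : Int), n.toNat ≤ k →
      pvAltAux k n [] =
        (pvDigitsAux k n []).reverse.flatMap (fun d => (pvENCODE_5421.get? d).getD []) := by
  induction k with
  | zero =>
    intro n hk
    simp [pvAltAux, pvDigitsAux]
  | succ k ih =>
    intro n hk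
    by_cases h : 0 < n
    · have hstep := pv_step n h
      simp only [pvAltAux, pvDigitsAux, h, if_pos]
      rw [pvAltAux_acc k, pvDigitsAux_acc k, ih _ (by omega)]
      simp
      have hm0 : (0 : Int) ≤ n % 10 := by omega
      have hm9 : n % 10 < (10 : Int) := by omega
      exact (pv_lut_eq_enc _ hm0 hm9).symm
    · simp [pvAltAux, pvDigitsAux, h]

-- for positive n the loop produces at least one digit's four bits, so B's emptiness test fails
theorem pvAltAux_ne_nil (k : Nat) (n : Int) (h : 0 < n) :
    pvAltAux (k + 1) n [] ≠ [] := by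
  simp only [pvAltAux, h, if_pos]
  rw [pvAltAux_acc k]
  simp [pvEncDigit]

-- ===== VERDICT (by name: the statement is the Claim_ definition above) =====
theorem encode_5421_spec : Claim_equal_encode_5421 := by
  intro number _ hpre
  unfold Spec_encode_5421 encode_5421 encode_5421_alt
  by_cases h0 : number = 0
  · subst h0; decide
  · have hpos : 0 < number := by
      unfold Pre_encode_5421 at hpre; omega
    obtain ⟨k, hk⟩ : ∃ k, number.toNat = k + 1 := ⟨number.toNat - 1, by omega⟩
    simp only [h0, hk, if_false]
    rw [pv_main (k + 1) number (by omega),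
        PySem.List.foldl_append_eq_flatMap, List.nil_append]
    have hne : List.flatMap (fun d => (pvENCODE_5421.get? d).getD [])
        (pvDigitsAux (k + 1) number []).reverse ≠ [] := by
      rw [← pv_main (k + 1) number (by omega)]
      exact pvAltAux_ne_nil k number hpos
    rw [if_neg hne]
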